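-- pv_equiv track=rewrite | github.com/byzp/of-ps | tools/clean_proto.py | extract_non_block_text
-- ===== SOURCE A (Python) =====
-- from typing import Dict, List, Set, Tuple
--
-- def extract_non_block_text(text: str, spans: List[Tuple[int, int]]) -> str:
--     """
--     把所有顶层块从原文里剥离，保留其余文本。
--     """
--     if not spans:
--         return text
--
--     spans = sorted(spans, key=lambda x: x[0])
--     parts = []
--     last = 0
--     for s, e in spans:
--         if last < s:
--             parts.append(text[last:s])
--         last = max(last, e)
--     if last < len(text):
--         parts.append(text[last:])
--     return "".join(parts)
-- ===== SOURCE B (Python) =====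
-- def extract_non_block_text(text, spans):
--     # Phase 1: merge the sorted spans into disjoint groups whose ends are
--     # running maxima; the virtual group (0, 0) makes the prefix a regular gap.
--     done = []
--     cur = (0, 0)
--     for s, e in sorted(spans, key=lambda p: p[0]):
--         if cur[1] < s:
--             done.append(cur)
--             cur = (s, max(cur[1], e))
--         else:
--             cur = (cur[0], max(cur[1], e))
--     done.append(cur)
--     # Phase 2: join the complement segments between adjacent groups, plus the tail.
--     pieces = [text[pe:ns] for (_, pe), (ns, _) in zip(done, done[1:])]
--     pieces.append(text[cur[1]:])
--     return "".join(pieces)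
-- ===== Notes on version B (the rewrite author's own statement) =====
-- stated objective: alternative
-- what changed: A interleaves merging and output in one loop with a `last` accumulator appending gap slices on the fly; B first folds the sorted spans into an explicit list of disjoint merged intervals (ends kept as running maxima, seeded with a virtual (0,0) group) and then derives the complement pieces from adjacent interval pairs via zip, plus the tail slice.
import Mathlib
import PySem

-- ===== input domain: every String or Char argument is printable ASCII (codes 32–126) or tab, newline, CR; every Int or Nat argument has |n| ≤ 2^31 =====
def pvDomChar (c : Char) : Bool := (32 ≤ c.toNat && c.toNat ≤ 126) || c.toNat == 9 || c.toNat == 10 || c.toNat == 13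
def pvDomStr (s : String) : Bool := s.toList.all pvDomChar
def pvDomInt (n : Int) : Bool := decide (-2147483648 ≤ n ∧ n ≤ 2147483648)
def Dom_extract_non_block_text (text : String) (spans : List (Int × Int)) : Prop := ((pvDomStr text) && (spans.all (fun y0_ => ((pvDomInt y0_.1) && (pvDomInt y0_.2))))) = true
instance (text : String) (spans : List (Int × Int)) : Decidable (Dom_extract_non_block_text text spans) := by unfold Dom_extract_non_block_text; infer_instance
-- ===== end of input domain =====

-- B replaces A's single gap-emitting loop by an explicit merge into disjoint intervals
-- followed by a complement pass over adjacent interval pairs (alternative decomposition, same cost).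


-- ===== PORT A =====
def extract_non_block_text (text : String) (spans : List (Int × Int)) : String :=
  if spans = [] then text
  else
    let sp := PySem.List.sorted spans (fun x => x.1)
    let st := sp.foldl (fun (st : List String × Int) se =>
      ((if st.2 < se.1 then st.1 ++ [PySem.Str.slice text (some st.2) (some se.1)] else st.1),
       max st.2 se.2)) ([], 0)
    let parts := if st.2 < PySem.Str.len text then st.1 ++ [PySem.Str.slice text (some st.2) none] else st.1
    PySem.Str.join "" parts

-- ===== PORT B =====
-- pieces = [text[pe:ns] for (_, pe), (ns, _) in zip(done, done[1:])]
def pvGaps (text : String) (g : List (Int × Int)) : List String :=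
  (g.zip g.tail).map (fun pq => PySem.Str.slice text (some pq.1.2) (some pq.2.1))

def extract_non_block_text_alt (text : String) (spans : List (Int × Int)) : String :=
  let st := (PySem.List.sorted spans (fun p => p.1)).foldl
    (fun (st : List (Int × Int) × (Int × Int)) se =>
      if st.2.2 < se.1 then (st.1 ++ [st.2], (se.1, max st.2.2 se.2))
      else (st.1, (st.2.1, max st.2.2 se.2)))
    ([], (0, 0))
  PySem.Str.join "" (pvGaps text (st.1 ++ [st.2]) ++ [PySem.Str.slice text (some st.2.2) none])

-- ===== PRECONDITION & SPEC =====
def Spec_extract_non_block_text (text : String) (spans : List (Int × Int)) (out : String) : Prop := out = extract_non_block_text_alt text spans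
instance (text : String) (spans : List (Int × Int)) (out : String) : Decidable (Spec_extract_non_block_text text spans out) := by unfold Spec_extract_non_block_text; infer_instance

-- ===== CLAIM (what is proved, stated in full; the proofs are below) =====
def Claim_equal_extract_non_block_text : Prop := ∀ (text : String) (spans : List (Int × Int)), Dom_extract_non_block_text text spans → Spec_extract_non_block_text text spans (extract_non_block_text text spans)

-- ===== LEMMAS AND PROOFS =====

-- appending a new group records the gap between the old last group's end and its start
lemma pvGaps_snoc (text : String) (g : List (Int × Int)) (c x : Int × Int) :
    pvGaps text (g ++ [c, x]) = pvGaps text (g ++ [c]) ++ [PySem.Str.slice text (some c.2) (some x.1)] := by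
  induction g with
  | nil => simp [pvGaps]
  | cons h t ih =>
    cases t with
    | nil => simp [pvGaps]
    | cons h2 t2 =>
      simp only [List.cons_append, pvGaps, List.zip_cons_cons, List.tail_cons, List.map_cons] at *
      simpa using ih

-- the gaps do not look at the end of the last group
lemma pvGaps_last_end (text : String) (g : List (Int × Int)) (a b b' : Int) :
    pvGaps text (g ++ [(a, b)]) = pvGaps text (g ++ [(a, b')]) := by
  induction g with
  | nil => simp [pvGaps]
  | cons h t ih =>
    cases t with
    | nil => simp [pvGaps]
    | cons h2 t2 =>
      simp only [List.cons_append, pvGaps, List.zip_cons_cons, List.tail_cons, List.map_cons] at *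
      simpa using ih

-- loop invariant: A's (parts, last) is (gaps of B's groups so far, end of B's current group)
lemma pvMain (text : String) (L : List (Int × Int)) :
    ∀ (done : List (Int × Int)) (cur : Int × Int),
    L.foldl (fun (st : List String × Int) se =>
        ((if st.2 < se.1 then st.1 ++ [PySem.Str.slice text (some st.2) (some se.1)] else st.1),
         max st.2 se.2)) (pvGaps text (done ++ [cur]), cur.2)
      = ((fun st : List (Int × Int) × (Int × Int) => (pvGaps text (st.1 ++ [st.2]), st.2.2))
          (L.foldl (fun (st : List (Int × Int) × (Int × Int)) se =>
            if st.2.2 < se.1 then (st.1 ++ [st.2], (se.1, max st.2.2 se.2))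
            else (st.1, (st.2.1, max st.2.2 se.2))) (done, cur))) := by
  induction L with
  | nil => intro done cur; simp
  | cons se L ih =>
    intro done cur
    by_cases h : cur.2 < se.1
    · simp only [List.foldl_cons, if_pos h]
      have h2 : pvGaps text (done ++ [cur]) ++ [PySem.Str.slice text (some cur.2) (some se.1)]
          = pvGaps text ((done ++ [cur]) ++ [(se.1, max cur.2 se.2)]) := by
        rw [List.append_assoc, List.singleton_append]
        exact (pvGaps_snoc text done cur (se.1, max cur.2 se.2)).symm
      rw [h2]
      exact ih (done ++ [cur]) (se.1, max cur.2 se.2)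
    · simp only [List.foldl_cons, if_neg h]
      have h2 : pvGaps text (done ++ [cur]) = pvGaps text (done ++ [(cur.1, max cur.2 se.2)]) := by
        have h3 := pvGaps_last_end text done cur.1 cur.2 (max cur.2 se.2)
        simpa using h3
      rw [h2]
      exact ih done (cur.1, max cur.2 se.2)

-- String extensionality via toList (used to reduce string goals to list goals)
lemma pvStrExt {s t : String} (h : s.toList = t.toList) : s = t := by
  have h2 := congrArg String.ofList h
  simpa using h2

-- "".join ignores a trailing empty piece (list level)
lemma pvCharsJoin_snoc (ps : List (List Char)) (q : List Char) :
    PySem.Chars.join [] (ps ++ [q]) = PySem.Chars.join [] ps ++ q := by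
  induction ps with
  | nil => simp [PySem.Chars.join_nil, PySem.Chars.join_singleton]
  | cons h t ih =>
    cases t with
    | nil => simp [PySem.Chars.join_singleton, PySem.Chars.join_cons_cons]
    | cons h2 t2 =>
      simp only [List.cons_append, PySem.Chars.join_cons_cons] at *
      simp [ih]

-- text[a:] is "" once a ≥ len(text)
lemma pvSlice_from_ge (text : String) (a : Int) (h : PySem.Str.len text ≤ a) :
    PySem.Str.slice text (some a) none = "" := by
  apply pvStrExt
  simp only [PySem.Str.toList_slice, PySem.Chars.slice_eq_listSlice]
  rw [PySem.List.slice_some_none]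
  have hlen : (text.toList.length : Int) ≤ a := by
    simpa [PySem.Str.len] using h
  have h2 : text.toList.length ≤ PySem.List.clampIdx text.toList.length a := by
    unfold PySem.List.clampIdx
    split_ifs <;> omega
  exact List.drop_eq_nil_of_le h2

-- ===== VERDICT (by name: the statement is the Claim_ definition above) =====
theorem extract_non_block_text_spec : Claim_equal_extract_non_block_text := by
  intro text spans _
  unfold Spec_extract_non_block_text extract_non_block_text extract_non_block_text_alt
  by_cases hs : spans = []
  · subst hs
    rw [PySem.List.sorted_eq_foldl_insertBy]
    apply pvStrExt
    simp [pvGaps, PySem.Str.toList_join, PySem.Chars.join_singleton,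
      PySem.Str.toList_slice, PySem.Chars.slice_eq_listSlice]
  · rw [if_neg hs]
    have hmain := pvMain text (PySem.List.sorted spans (fun x => x.1)) [] (0, 0)
    have h0 : pvGaps text ([] ++ [((0 : Int), (0 : Int))]) = [] := by simp [pvGaps]
    rw [h0] at hmain
    simp only []
    rw [hmain]
    by_cases hlt : (PySem.List.sorted spans (fun x => x.1)).foldl
        (fun (st : List (Int × Int) × (Int × Int)) se =>
          if st.2.2 < se.1 then (st.1 ++ [st.2], (se.1, max st.2.2 se.2))
          else (st.1, (st.2.1, max st.2.2 se.2))) ([], (0, 0)) |>.2.2 < PySem.Str.len text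
    · rw [if_pos hlt]
    · rw [if_neg hlt, pvSlice_from_ge text _ (not_lt.mp hlt)]
      apply pvStrExt
      simp only [PySem.Str.toList_join, List.map_append, List.map_cons, List.map_nil]
      rw [show ("" : String).toList = [] from rfl, pvCharsJoin_snoc]
      simp
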